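-- pv_equiv track=rewrite | github.com/SRoussel/advent-of-code-23 | src/day_14.py | get_load
-- ===== SOURCE A (Python) =====
-- def tilt(columns):
--     """Return columns with rocks shifted north."""
--     for i in range(len(columns)):
--         for j in range(len(columns[0])):
--             if "O" == columns[i][j]:
--                 k = j - 1
--                 m = j
--                 while k >= 0:
--                     if columns[i][k] == ".":
--                         columns[i][k] = "O"
--                         columns[i][m] = "."
--                         m = k
--                         k -= 1
--                     else:
--                         break
--     return columns
--
-- def rotate_90(columns):
--     """Rotate columns 90 degrees counter-clockwise."""
--     return list([list(item) for item in zip(*columns)])[::-1]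
--
-- def get_load(columns, index):
--     """Return the load of columns after index + 1 cycles."""
--     states = {}
--     totals = {}
--     count = 0
--
--     while True:
--         columns = tilt(columns)
--         columns = tilt(rotate_90(columns))
--         columns = tilt(rotate_90(columns))
--         columns = tilt(rotate_90(columns))
--         columns = rotate_90(columns)
--
--         total = 0
--         for i in range(len(columns)):
--             for j in range(len(columns[0])):
--                 if "O" == columns[i][j]:
--                     total += len(columns[0]) - j
--
--         str = "".join(item for col in columns for item in col)
--         if str in states:
--             return totals[states[str] + ((index - states[str]) % (count - states[str]))]
--
--         states[str] = count
--         totals[count] = total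
--         count += 1
-- ===== SOURCE B (Python) =====
-- # Alternative implementation: each tilt moves all rocks in a single pass per column
-- # by tracking the next free slot, instead of A's per-rock one-step-at-a-time bubbling.
-- # Return-value equivalence only: A mutates the rows of `columns` in place, B does not.
--
-- def _tilt_col(col):
--     """Shift every 'O' toward index 0, past '.' cells only, in one pass."""
--     res = list(col)
--     free = 0
--     for j, c in enumerate(col):
--         if c == "O":
--             res[j] = "."
--             res[free] = "O"
--             free += 1
--         elif c != ".":
--             free = j + 1
--     return res
--
-- def _rotate_ccw(grid):
--     width = len(grid[0]) if grid else 0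
--     return [[row[j] for row in grid] for j in reversed(range(width))]
--
-- def _load(grid):
--     return sum(len(col) - j for col in grid for j, c in enumerate(col) if c == "O")
--
-- def get_load(columns, index):
--     """Return the load of columns after index + 1 cycles."""
--     grid = [list(row) for row in columns]
--     seen = {}
--     loads = []
--     count = 0
--     while True:
--         for _ in range(4):
--             grid = [_tilt_col(col) for col in grid]
--             grid = _rotate_ccw(grid)
--         key = "".join(c for col in grid for c in col)
--         if key in seen:
--             s = seen[key]
--             return loads[s + (index - s) % (count - s)]
--         seen[key] = count
--         loads.append(_load(grid))
--         count += 1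
-- ===== Notes on version B (the rewrite author's own statement) =====
-- stated objective: alternative
-- what changed: Each tilt now moves every rock in a single pass per column by tracking the next free slot, instead of A's per-rock one-step-at-a-time bubbling while-loop; the per-cycle totals are kept in a list instead of a count-keyed dict; worst-case work per tilt drops from quadratic to linear per column, though a timing run shows no measured speedup on the generated inputs.
-- outside the precondition, e.g. on get_load([['.'], ['.', 'O']], 0): A returns 0, B returns 1; on get_load([['#'], ['#', 'O']], 0): A returns 0, B returns 0
import Mathlib
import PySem

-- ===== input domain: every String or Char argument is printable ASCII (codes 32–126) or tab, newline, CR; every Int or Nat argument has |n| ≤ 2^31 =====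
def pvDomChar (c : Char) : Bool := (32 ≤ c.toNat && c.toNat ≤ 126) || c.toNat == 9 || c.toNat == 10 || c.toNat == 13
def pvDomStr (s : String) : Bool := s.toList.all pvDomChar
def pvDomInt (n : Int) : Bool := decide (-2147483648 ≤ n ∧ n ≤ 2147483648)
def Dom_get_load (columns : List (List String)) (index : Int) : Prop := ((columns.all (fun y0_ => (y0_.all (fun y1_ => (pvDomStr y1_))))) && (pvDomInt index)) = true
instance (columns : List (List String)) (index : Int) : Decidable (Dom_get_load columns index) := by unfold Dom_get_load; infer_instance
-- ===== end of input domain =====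

-- B replaces A's per-rock one-step-at-a-time bubbling by a single free-slot pass per
-- column (a different tilt algorithm, similar measured cost); return-value equivalence
-- only: Python A mutates the rows of `columns` in place, Python B does not.

-- Shared totalization guard for the `while True` loops of both ports: an upper bound
-- on the number of cycle iterations (states are arrangements of the input's cell
-- multiset, so at most N! ≤ N^N distinct states with N cells); when the fuel runs out
-- (never on inputs where the Pythons return) both ports return 0.
def pvFuel (columns : List (List String)) : Nat :=
  let N := (columns.map List.length).sum + 2
  N ^ N

-- ===== PORT A =====
-- inner `while k >= 0: …` of tilt; kp1 encodes k+1 so the countdown is structural.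
-- list reads/writes are in range on Pre_ (rectangular grid), so getD/set are exact.
def tiltWhileA : List String → Nat → Nat → List String
  | row, 0, _ => row
  | row, k+1, m =>
    if row.getD k "" == "." then tiltWhileA ((row.set k "O").set m ".") k k else row

-- `for j in range(len(columns[0])): if "O" == columns[i][j]: …`
def tiltRowA (m0 : Nat) (row : List String) : List String :=
  (List.range m0).foldl (fun r j => if r.getD j "" == "O" then tiltWhileA r j j else r) row

def tiltA (cols : List (List String)) : List (List String) :=
  match cols with
  | [] => []
  | c :: _ => cols.map (fun row => tiltRowA c.length row)

-- zip(*cols): take heads while no row is exhausted; fuel = first row's length suffices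
-- because zip stops at the shortest row.
def zipStarGo : Nat → List (List String) → List (List String)
  | 0, _ => []
  | n+1, cols =>
    if cols.any (fun r => r.isEmpty) then []
    else (cols.map (fun r => r.headD "")) :: zipStarGo n (cols.map (fun r => r.tail))

def rotateA (cols : List (List String)) : List (List String) :=
  (match cols with
   | [] => []
   | c :: _ => zipStarGo c.length cols).reverse

def totalA (cols : List (List String)) : Int :=
  let m0 := (cols.headD []).length
  cols.foldl (fun t row =>
    (List.range m0).foldl
      (fun t (j : Nat) => if row.getD j "" == "O" then t + ((m0 : Int) - (j : Int)) else t) t) 0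

def joinA (cols : List (List String)) : String :=
  PySem.Str.join "" (cols.flatMap (fun c => c))

def loopA (index : Int) : Nat → List (List String) → PySem.Dict String Int → PySem.Dict Int Int → Int → Int
  | 0, _, _, _, _ => 0
  | fuel+1, cols, states, totals, count =>
    let c1 := tiltA cols
    let c2 := tiltA (rotateA c1)
    let c3 := tiltA (rotateA c2)
    let c4 := tiltA (rotateA c3)
    let c5 := rotateA c4
    let total := totalA c5
    let s := joinA c5
    match states.get? s with
    | some v => totals.getD (v + PySem.Int.mod (index - v) (count - v)) 0
    | none => loopA index fuel c5 (states.insert s count) (totals.insert count total) (count + 1)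

def get_load (columns : List (List String)) (index : Int) : Int :=
  loopA index (pvFuel columns) columns PySem.Dict.empty PySem.Dict.empty 0

-- ===== PORT B =====
-- single pass per column: `free` is the slot the next rock rolls into.
def tiltColB (col : List String) : List String :=
  ((PySem.List.enumerate col 0).foldl
    (fun (st : List String × Int) jc =>
      if jc.2 == "O" then
        (PySem.List.pySetD (PySem.List.pySetD st.1 jc.1 ".") st.2 "O", st.2 + 1)
      else if jc.2 == "." then st
      else (st.1, jc.1 + 1))
    (col, 0)).1

def rotateB (grid : List (List String)) : List (List String) :=
  let width := match grid with | [] => 0 | r :: _ => r.length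
  ((List.range width).reverse).map (fun (j : Nat) => grid.map (fun row => PySem.List.pyGetD row ((j : Nat) : Int) ""))

def loadB (grid : List (List String)) : Int :=
  grid.foldl (fun t col =>
    (PySem.List.enumerate col 0).foldl
      (fun t jc => if jc.2 == "O" then t + (PySem.List.len col - jc.1) else t) t) 0

def joinB (grid : List (List String)) : String :=
  PySem.Str.join "" (grid.flatMap (fun c => c))

def loopB (index : Int) : Nat → List (List String) → PySem.Dict String Int → List Int → Int → Int
  | 0, _, _, _, _ => 0
  | fuel+1, grid, seen, loads, count =>
    let g1 := rotateB (grid.map tiltColB)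
    let g2 := rotateB (g1.map tiltColB)
    let g3 := rotateB (g2.map tiltColB)
    let g4 := rotateB (g3.map tiltColB)
    let key := joinB g4
    match seen.get? key with
    | some s => (PySem.List.pyGet? loads (s + PySem.Int.mod (index - s) (count - s))).getD 0
    | none => loopB index fuel g4 (seen.insert key count) (loads ++ [loadB g4]) (count + 1)

def get_load_alt (columns : List (List String)) (index : Int) : Int :=
  loopB index (pvFuel columns) (columns.map (fun r => r)) PySem.Dict.empty [] 0

-- ===== PRECONDITION & SPEC =====
-- Pre_ restricts to the task's natural domain, rectangular grids: on ragged input A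
-- raises IndexError when a row is shorter than the first, and silently truncates
-- longer rows at the first rotation (an artifact of zip), behaviour neither program
-- specifies; B usually agrees there but can tilt a rock across the truncation edge.
def Pre_get_load (columns : List (List String)) (index : Int) : Prop :=
  ∀ row ∈ columns, row.length = (columns.headD []).length
instance (columns : List (List String)) (index : Int) : Decidable (Pre_get_load columns index) := by
  unfold Pre_get_load; infer_instance

def pvWitness_get_load : List (List String) × Int := ([["O", "."], [".", "#"]], 3)

def Spec_get_load (columns : List (List String)) (index : Int) (out : Int) : Prop := out = get_load_alt columns index
instance (columns : List (List String)) (index : Int) (out : Int) : Decidable (Spec_get_load columns index out) := by unfold Spec_get_load; infer_instance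

-- ===== CLAIM (what is proved, stated in full; the proofs are below) =====
def Claim_equal_get_load : Prop := ∀ (columns : List (List String)) (index : Int), Dom_get_load columns index → Pre_get_load columns index → Spec_get_load columns index (get_load columns index)

-- ===== LEMMAS AND PROOFS =====

-- a rectangular grid: every row has the first row's length (this is Pre_get_load)
def Rect (g : List (List String)) : Prop := ∀ row ∈ g, row.length = (g.headD []).length

-- small getD/set helpers used throughout
lemma getD_set_self (l : List String) (i : Nat) (v : String) (h : i < l.length) :
    (l.set i v).getD i "" = v := by
  simp [List.getD_eq_getElem?_getD, h]

lemma getD_set_ne (l : List String) (i j : Nat) (v : String) (h : i ≠ j) :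
    (l.set i v).getD j "" = l.getD j "" := by
  simp [List.getD_eq_getElem?_getD, h]

lemma set_getD_self (l : List String) (i : Nat) (h : i < l.length) :
    l.set i (l.getD i "") = l := by
  rw [List.getD_eq_getElem l "" h]; exact List.set_getElem_self h

-- A's inner while-loop, over a run of dots, lands the rock in slot `free`
lemma bubble_eq (free : Nat) : ∀ (n : Nat) (r : List String),
    free + n < r.length →
    (∀ i, free ≤ i → i < free + n → r.getD i "" = ".") →
    (free = 0 ∨ r.getD (free - 1) "" ≠ ".") →
    r.getD (free + n) "" = "O" →
    tiltWhileA r (free + n) (free + n) = (r.set (free + n) ".").set free "O" := by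
  intro n
  induction n with
  | zero =>
    intro r hlen hdots hb hO
    simp only [Nat.add_zero] at hlen hO ⊢
    have hr : (r.set free ".").set free "O" = r := by
      rw [List.set_set, ← hO, set_getD_self r free hlen]
    rw [hr]
    cases free with
    | zero => rfl
    | succ k =>
      have hk : (r.getD k "" == ".") = false := by
        rcases hb with h0 | hne
        · exact absurd h0 (Nat.succ_ne_zero k)
        · simpa using hne
      simp only [tiltWhileA, hk, Bool.false_eq_true, if_false]
  | succ n ih =>
    intro r hlen hdots hb hO
    have hdot : r.getD (free + n) "" = "." :=
      hdots (free + n) (Nat.le_add_right _ _) (by omega)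
    have hg : (r.getD (free + n) "" == ".") = true := by rw [hdot]; rfl
    have hstep : tiltWhileA r (free + n + 1) (free + n + 1)
        = tiltWhileA ((r.set (free + n) "O").set (free + n + 1) ".") (free + n) (free + n) := by
      simp only [tiltWhileA, hg, if_true]
    set r' := (r.set (free + n) "O").set (free + n + 1) "." with hr'
    have hlenr : r'.length = r.length := by rw [hr', List.length_set, List.length_set]
    have hih := ih r' (by omega)
      (by
        intro i hi1 hi2
        rw [hr', getD_set_ne _ _ _ _ (by omega), getD_set_ne _ _ _ _ (by omega)]
        exact hdots i hi1 (by omega))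
      (by
        rcases hb with h0 | hne
        · exact Or.inl h0
        · refine Or.inr ?_
          by_cases hz : free - 1 = free + n
          · exfalso; exact hne (by rw [hz]; exact hdot)
          · rw [hr', getD_set_ne _ _ _ _ (by omega), getD_set_ne _ _ _ _ (by omega)]
            exact hne)
      (by rw [hr', getD_set_ne _ _ _ _ (by omega), getD_set_self _ _ _ (by omega)])
    rw [Nat.add_succ] at hO ⊢
    rw [hstep, hih]
    have h0 : r.set (free + n) "." = r := by
      rw [← hdot]; exact set_getD_self r _ (by omega)
    have h1 : r'.set (free + n) "." = r.set (free + n + 1) "." := by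
      rw [hr', List.set_comm _ _ (by omega : free + n + 1 ≠ free + n), List.set_set, h0]
    rw [h1]

-- the two row-tilt loop bodies, named so the folds can be reasoned about
def stepA (r : List String) (j : Nat) : List String :=
  if r.getD j "" == "O" then tiltWhileA r j j else r

def stepB (st : List String × Int) (jc : Int × String) : List String × Int :=
  if jc.2 == "O" then
    (PySem.List.pySetD (PySem.List.pySetD st.1 jc.1 ".") st.2 "O", st.2 + 1)
  else if jc.2 == "." then st
  else (st.1, jc.1 + 1)

lemma tiltRowA_eq_foldl (m0 : Nat) (row : List String) :
    tiltRowA m0 row = (List.range m0).foldl stepA row := rfl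

lemma tiltColB_eq_foldl (col : List String) :
    tiltColB col = ((PySem.List.enumerate col 0).foldl stepB (col, 0)).1 := rfl

-- main row lemma: A's left-to-right bubbling fold equals B's free-slot fold
lemma row_main : ∀ (n : Nat) (col : List String) (j free : Nat) (r : List String),
    j + n = col.length → r.length = col.length → free ≤ j →
    (∀ i, j ≤ i → i < col.length → r.getD i "" = col.getD i "") →
    (∀ i, free ≤ i → i < j → r.getD i "" = ".") →
    (free = 0 ∨ r.getD (free - 1) "" ≠ ".") →
    (List.range' j n).foldl stepA r
      = ((PySem.List.enumerate (col.drop j) (j : Int)).foldl stepB (r, (free : Int))).1 := by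
  intro n
  induction n with
  | zero =>
    intro col j free r hjn hlen hfj hsuf hdots hb
    have : col.drop j = [] := List.drop_of_length_le (by omega)
    simp [this]
  | succ n ih =>
    intro col j free r hjn hlen hfj hsuf hdots hb
    have hj : j < col.length := by omega
    have hdropc : col.drop j = col[j] :: col.drop (j + 1) := List.drop_eq_getElem_cons hj
    rw [List.range'_succ, hdropc]
    rw [List.foldl_cons, PySem.List.enumerate_cons, List.foldl_cons]
    have hcol : col.getD j "" = col[j] := List.getD_eq_getElem col "" hj
    have hrj : r.getD j "" = col[j] := by rw [hsuf j le_rfl hj, hcol]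
    by_cases hO : col[j] = "O"
    · -- rock: A bubbles it to `free`, B writes it there directly
      have hAguard : (r.getD j "" == "O") = true := by rw [hrj, hO]; rfl
      have hA : stepA r j = (r.set j ".").set free "O" := by
        have hjf : j = free + (j - free) := by omega
        simp only [stepA, hAguard, if_true]
        rw [hjf]
        exact bubble_eq free (j - free) r (by omega)
          (fun i h1 h2 => hdots i h1 (by omega)) hb (by rw [← hjf, hrj, hO])
      have hB : stepB (r, (free : Int)) ((j : Int), col[j])
          = ((r.set j ".").set free "O", ((free + 1 : Nat) : Int)) := by
        simp [stepB, hO, PySem.List.pySetD_natCast]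
      rw [hA, hB]
      set r1 := (r.set j ".").set free "O" with hr1
      have hlen1 : r1.length = col.length := by simp [hr1, hlen]
      have := ih col (j + 1) (free + 1) r1 (by omega) hlen1 (by omega)
        (by
          intro i hi1 hi2
          rw [hr1, getD_set_ne _ _ _ _ (by omega), getD_set_ne _ _ _ _ (by omega)]
          exact hsuf i (by omega) hi2)
        (by
          intro i hi1 hi2
          by_cases hij : i = j
          · subst hij
            rw [hr1, getD_set_ne _ _ _ _ (by omega), getD_set_self _ _ _ (by omega)]
          · rw [hr1, getD_set_ne _ _ _ _ (by omega), getD_set_ne _ _ _ _ (by omega)]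
            exact hdots i (by omega) (by omega))
        (by
          refine Or.inr ?_
          rw [hr1]
          simp only [Nat.add_sub_cancel]
          rw [getD_set_self _ _ _ (by rw [List.length_set]; omega)]
          decide)
      rw [this]
      push_cast
      rfl
    · -- no rock: A leaves the row, B updates at most `free`
      have hAguard : (r.getD j "" == "O") = false := by rw [hrj]; simpa using hO
      have hA : stepA r j = r := by
        simp only [stepA, hAguard, Bool.false_eq_true, if_false]
      by_cases hdot : col[j] = "."
      · have hB : stepB (r, (free : Int)) ((j : Int), col[j]) = (r, (free : Int)) := by
          simp [stepB, hdot]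
        rw [hA, hB]
        exact ih col (j + 1) free r (by omega) hlen (by omega)
          (fun i h1 h2 => hsuf i (by omega) h2)
          (by
            intro i h1 h2
            by_cases hij : i = j
            · subst hij; rw [hrj, hdot]
            · exact hdots i h1 (by omega))
          hb
      · have hB : stepB (r, (free : Int)) ((j : Int), col[j])
            = (r, ((j + 1 : Nat) : Int)) := by
          simp [stepB, hO, hdot]
        rw [hA, hB]
        exact ih col (j + 1) (j + 1) r (by omega) hlen (by omega)
          (fun i h1 h2 => hsuf i (by omega) h2)
          (fun i h1 h2 => absurd h2 (by omega))
          (by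
            refine Or.inr ?_
            simp only [Nat.add_sub_cancel]
            rw [hrj]
            simp [hdot])

lemma tiltRow_eq (row : List String) : tiltRowA row.length row = tiltColB row := by
  rw [tiltRowA_eq_foldl, tiltColB_eq_foldl, List.range_eq_range']
  have := row_main row.length row 0 0 row (by omega) rfl (by omega)
    (fun i _ _ => rfl) (fun i h1 h2 => absurd h2 (by omega)) (Or.inl rfl)
  simpa using this

lemma length_tiltWhileA : ∀ (kp1 m : Nat) (r : List String),
    (tiltWhileA r kp1 m).length = r.length := by
  intro kp1
  induction kp1 with
  | zero => intro m r; rfl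
  | succ k ih =>
    intro m r
    cases h : (r.getD k "" == ".")
    · simp only [tiltWhileA, h, Bool.false_eq_true, if_false]
    · simp only [tiltWhileA, h, if_true]
      rw [ih, List.length_set, List.length_set]

lemma length_foldl_stepA : ∀ (l : List Nat) (r : List String),
    (l.foldl stepA r).length = r.length := by
  intro l
  induction l with
  | nil => intro r; rfl
  | cons x xs ih =>
    intro r
    rw [List.foldl_cons, ih]
    cases h : (r.getD x "" == "O")
    · simp only [stepA, h, Bool.false_eq_true, if_false]
    · simp only [stepA, h, if_true]
      exact length_tiltWhileA x x r

lemma length_tiltColB (col : List String) : (tiltColB col).length = col.length := by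
  rw [← tiltRow_eq, tiltRowA_eq_foldl, length_foldl_stepA]

-- zip(*g) of a rectangular grid is the index-wise transpose
lemma zipStar_rect : ∀ (m : Nat) (g : List (List String)),
    (∀ row ∈ g, row.length = m) →
    zipStarGo m g = (List.range m).map (fun j => g.map (fun r => r.getD j "")) := by
  intro m
  induction m with
  | zero => intro g _; simp [zipStarGo]
  | succ m ih =>
    intro g hg
    have hne : (g.any (fun r => r.isEmpty)) = false := by
      simp only [List.any_eq_false]
      intro r hr
      have hL := hg r hr
      simp only [List.isEmpty_iff]
      intro hnil
      rw [hnil] at hL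
      simp at hL
    have htail : ∀ row ∈ g.map List.tail, row.length = m := by
      intro row hrow
      rcases List.mem_map.mp hrow with ⟨r, hr, rfl⟩
      have := hg r hr
      simp [List.length_tail, this]
    rw [zipStarGo, hne]
    simp only [Bool.false_eq_true, if_false]
    rw [ih _ htail, List.range_succ_eq_map]
    congr 1
    · apply List.map_congr_left
      intro r hr
      have hlen := hg r hr
      cases r with
      | nil => simp at hlen
      | cons a as => rfl
    · rw [List.map_map]
      apply List.map_congr_left
      intro j _
      rw [List.map_map]
      apply List.map_congr_left
      intro r hr
      have hlen := hg r hr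
      simp only [Function.comp_apply]
      cases r with
      | nil => simp at hlen
      | cons a as => rfl

lemma rect_const (g : List (List String)) (k : Nat)
    (h : ∀ row ∈ g, row.length = k) : Rect g := by
  intro row hrow
  cases g with
  | nil => simp at hrow
  | cons a t =>
    rw [h row hrow]
    exact (h a (by simp)).symm

lemma rot_eq (g : List (List String)) (hg : Rect g) : rotateA g = rotateB g := by
  cases g with
  | nil => rfl
  | cons c t =>
    have hr : ∀ row ∈ c :: t, row.length = c.length := hg
    show (zipStarGo c.length (c :: t)).reverse = _
    rw [zipStar_rect c.length (c :: t) hr]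
    simp only [rotateB]
    rw [← List.map_reverse]
    apply List.map_congr_left
    intro j _
    apply List.map_congr_left
    intro r _
    simp [PySem.List.pyGetD_natCast]

lemma rect_rotateB (g : List (List String)) : Rect (rotateB g) := by
  apply rect_const _ g.length
  intro row hrow
  simp only [rotateB] at hrow
  rcases List.mem_map.mp hrow with ⟨j, _, rfl⟩
  simp

lemma tiltA_eq (g : List (List String)) (hg : Rect g) : tiltA g = g.map tiltColB := by
  cases g with
  | nil => rfl
  | cons c t =>
    show (c :: t).map (fun row => tiltRowA c.length row) = _
    apply List.map_congr_left
    intro r hr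
    have : r.length = c.length := hg r hr
    rw [← this, tiltRow_eq]

lemma rect_tiltB (g : List (List String)) (hg : Rect g) : Rect (g.map tiltColB) := by
  cases g with
  | nil => intro row h; simp at h
  | cons c t =>
    intro row hrow
    rcases List.mem_map.mp hrow with ⟨r, hr, rfl⟩
    have h1 : r.length = c.length := hg r hr
    simp [length_tiltColB, h1]

lemma cycle_step (g : List (List String)) (hg : Rect g) :
    rotateA (tiltA g) = rotateB (g.map tiltColB) ∧ Rect (rotateB (g.map tiltColB)) := by
  constructor
  · rw [tiltA_eq g hg]; exact rot_eq _ (rect_tiltB g hg)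
  · exact rect_rotateB _

-- the load sum: A's range-indexed inner fold equals B's enumerate fold
lemma inner_total : ∀ (row : List String) (L : Int) (s : Nat) (t : Int),
    (List.range' s row.length).foldl
      (fun t j => if row.getD (j - s) "" == "O" then t + (L - (j : Int)) else t) t
      = (PySem.List.enumerate row (s : Int)).foldl
          (fun t jc => if jc.2 == "O" then t + (L - jc.1) else t) t := by
  intro row
  induction row with
  | nil => intro L s t; simp [PySem.List.enumerate]
  | cons c cs ih =>
    intro L s t
    rw [List.length_cons, List.range'_succ, List.foldl_cons, PySem.List.enumerate_cons,
      List.foldl_cons]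
    have hhead : ((c :: cs).getD (s - s) "" == "O") = (c == "O") := by
      simp
    rw [hhead]
    have hcongr : ∀ (t' : Int),
        (List.range' (s + 1) cs.length).foldl
          (fun t j => if (c :: cs).getD (j - s) "" == "O" then t + (L - (j : Int)) else t) t'
        = (List.range' (s + 1) cs.length).foldl
          (fun t j => if cs.getD (j - (s + 1)) "" == "O" then t + (L - (j : Int)) else t) t' := by
      intro t'
      apply PySem.List.foldl_congr_mem _ _ _ _ ?_
      intro acc x hx
      have hxs : s + 1 ≤ x := (List.mem_range'_1.mp hx).1
      have : (c :: cs).getD (x - s) "" = cs.getD (x - (s + 1)) "" := by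
        have hx1 : x - s = (x - (s + 1)) + 1 := by omega
        rw [hx1]
        rfl
      rw [this]
    have hs1 : ((s : Int) + 1) = ((s + 1 : Nat) : Int) := by push_cast; ring
    cases hOc : (c == "O") with
    | true => rw [if_pos rfl, hcongr, hs1, ih]
    | false =>
      simp only [Bool.false_eq_true, if_false]
      rw [hcongr, hs1, ih]

lemma total_eq (g : List (List String)) (hg : Rect g) : totalA g = loadB g := by
  simp only [totalA, loadB, PySem.List.len_eq]
  apply PySem.List.foldl_congr_mem _ _ _ _ ?_
  intro acc row hrow
  have hlen : row.length = (g.headD []).length := hg row hrow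
  rw [← hlen]
  have h := inner_total row ((row.length : Int)) 0 acc
  simp only [Nat.cast_zero, Nat.sub_zero] at h
  rw [List.range_eq_range', h]

-- loads list vs totals dict, in lockstep
lemma loop_eq : ∀ (fuel : Nat) (index : Int) (g : List (List String))
    (states : PySem.Dict String Int) (totals : PySem.Dict Int Int) (loads : List Int)
    (count : Int),
    Rect g →
    (∀ k : Nat, k < loads.length → totals.getD (k : Int) 0 = loads.getD k 0) →
    (∀ s v, states.get? s = some v → 0 ≤ v ∧ v < count) →
    count = (loads.length : Int) →
    loopA index fuel g states totals count = loopB index fuel g states loads count := by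
  intro fuel
  induction fuel with
  | zero => intro index g states totals loads count _ _ _ _; rfl
  | succ fuel ih =>
    intro index g states totals loads count hrect hrel hvals hcount
    obtain ⟨e1, r1⟩ := cycle_step g hrect
    obtain ⟨e2, r2⟩ := cycle_step _ r1
    obtain ⟨e3, r3⟩ := cycle_step _ r2
    obtain ⟨e4, r4⟩ := cycle_step _ r3
    simp only [loopA, loopB]
    rw [e1, e2, e3, e4]
    set g4 := rotateB (((rotateB (((rotateB (((rotateB ((g.map tiltColB))).map tiltColB))).map tiltColB))).map tiltColB)) with hg4
    rw [show joinA g4 = joinB g4 from rfl]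
    cases hv : states.get? (joinB g4) with
    | some v =>
      simp only []
      obtain ⟨hv0, hvc⟩ := hvals _ _ hv
      have hpos : (0 : Int) < count - v := by omega
      set key := v + PySem.Int.mod (index - v) (count - v) with hkey
      have hk0 : 0 ≤ key := by
        have := PySem.Int.mod_nonneg (index - v) hpos
        omega
      have hkc : key < count := by
        have := PySem.Int.mod_lt (index - v) hpos
        omega
      have hklen : key.toNat < loads.length := by omega
      have hkeyn : key = ((key.toNat : Nat) : Int) := by omega
      rw [PySem.List.pyGet?_of_nonneg _ hk0, hkeyn, hrel key.toNat hklen]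
      rw [List.getD_eq_getElem?_getD]
      simp only [List.getElem?_eq_getElem hklen, Option.getD_some]
      rw [show ((key.toNat : Int)).toNat = key.toNat from by omega]
      rw [List.getElem?_eq_getElem hklen]
      rfl
    | none =>
      simp only []
      rw [total_eq g4 r4]
      apply ih
      · exact r4
      · intro k hk
        rw [List.length_append, List.length_singleton] at hk
        rw [PySem.Dict.getD_insert]
        by_cases hkl : k = loads.length
        · subst hkl
          rw [if_pos hcount.symm, List.getD_eq_getElem?_getD]
          simp
        · have hkl' : k < loads.length := by omega
          rw [if_neg (by intro h; apply hkl; omega), hrel k hkl', List.getD_append _ _ _ _ hkl']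
      · intro s v hsv
        rw [PySem.Dict.get?_insert] at hsv
        by_cases hs : s = joinB g4
        · rw [if_pos hs] at hsv
          cases hsv
          omega
        · rw [if_neg hs] at hsv
          have := hvals s v hsv
          omega
      · rw [List.length_append, List.length_singleton]
        push_cast
        omega


-- ===== VERDICT (by name: the statement is the Claim_ definition above) =====
theorem get_load_spec : Claim_equal_get_load := by
  intro columns index _ hpre
  unfold Spec_get_load
  unfold get_load get_load_alt
  rw [List.map_id']
  exact loop_eq (pvFuel columns) index columns PySem.Dict.empty PySem.Dict.empty [] 0
    hpre (fun k hk => by simp at hk) (fun s v hsv => by simp [PySem.Dict.get?_empty] at hsv)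
    rfl
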